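-- pv_equiv track=rewrite | github.com/tosca07/picochess | certabo/parser.py | _piece_count
-- ===== SOURCE A (Python) =====
-- def _piece_count(board, board_half):
--     w_count = 0
--     b_count = 0
--     for i in board_half:
--         if board[i] != ' ':
--             if board[i] < 'Z':
--                 w_count += 1
--             else:
--                 b_count += 1
--     return w_count, b_count
-- ===== SOURCE B (Python) =====
-- def _piece_count(board, board_half):
--     # Divide and conquer: split the index list in half, count each half
--     # recursively, and add the (white, black) pairs.
--     if not board_half:
--         return 0, 0
--     if len(board_half) == 1:
--         c = board[board_half[0]]
--         if c == ' ':
--             return 0, 0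
--         return (1, 0) if c < 'Z' else (0, 1)
--     mid = len(board_half) // 2
--     w1, b1 = _piece_count(board, board_half[:mid])
--     w2, b2 = _piece_count(board, board_half[mid:])
--     return w1 + w2, b1 + b2
-- ===== Notes on version B (the rewrite author's own statement) =====
-- stated objective: alternative
-- what changed: Replaces A's single left-to-right loop with two running accumulators by a divide-and-conquer recursion that splits the index list in half, counts each half recursively, and adds the (white, black) pairs; correct because pairwise addition is associative.
import Mathlib
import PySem

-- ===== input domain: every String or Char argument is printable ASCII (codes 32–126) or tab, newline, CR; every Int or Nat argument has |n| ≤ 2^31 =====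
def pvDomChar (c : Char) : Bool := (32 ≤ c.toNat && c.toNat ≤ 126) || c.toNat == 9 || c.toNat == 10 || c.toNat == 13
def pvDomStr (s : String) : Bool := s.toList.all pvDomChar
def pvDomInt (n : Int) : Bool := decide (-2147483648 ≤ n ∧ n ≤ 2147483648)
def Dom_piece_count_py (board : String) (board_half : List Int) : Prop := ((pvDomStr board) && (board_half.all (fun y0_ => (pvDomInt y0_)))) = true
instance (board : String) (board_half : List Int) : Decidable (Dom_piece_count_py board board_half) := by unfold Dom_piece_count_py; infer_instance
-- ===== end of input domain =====

-- B replaces A's single accumulator loop by a divide-and-conquer recursion: split the index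
-- list in half, count each half recursively, add the (white, black) pairs (alternative decomposition).

-- ===== PORT A =====
def piece_count_py (board : String) (board_half : List Int) : Int × Int :=
  board_half.foldl (fun (st : Int × Int) i =>
    match PySem.Str.pyGet? board i with
    | some c => if c ≠ ' ' then (if c < 'Z' then (st.1 + 1, st.2) else (st.1, st.2 + 1)) else st
    | none => st) (0, 0)

-- ===== PORT B =====
def piece_count_py_alt (board : String) (board_half : List Int) : Int × Int :=
  match board_half with
  | [] => (0, 0)
  | [i] =>
    -- board[board_half[0]]; none = IndexError (excluded by Pre_)
    match PySem.Str.pyGet? board i with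
    | some c => if c = ' ' then (0, 0) else if c < 'Z' then (1, 0) else (0, 1)
    | none => (0, 0)
  | x :: y :: rest =>
    let mid := (x :: y :: rest).length / 2
    let p1 := piece_count_py_alt board ((x :: y :: rest).take mid)
    let p2 := piece_count_py_alt board ((x :: y :: rest).drop mid)
    (p1.1 + p2.1, p1.2 + p2.2)
termination_by board_half.length
decreasing_by
  · simp only [List.length_take, List.length_cons]; omega
  · simp only [List.length_drop, List.length_cons]; omega

-- ===== PRECONDITION & SPEC =====
-- Pre_ excludes indices on which Python's board[i] raises IndexError.
def Pre_piece_count_py (board : String) (board_half : List Int) : Prop :=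
  ∀ i ∈ board_half, -(board.toList.length : Int) ≤ i ∧ i < board.toList.length
instance (board : String) (board_half : List Int) : Decidable (Pre_piece_count_py board board_half) := by unfold Pre_piece_count_py; infer_instance
def pvWitness_piece_count_py : String × List Int := ("Kq r", [0, 1, 3, -1])

def Spec_piece_count_py (board : String) (board_half : List Int) (out : Int × Int) : Prop := out = piece_count_py_alt board board_half
instance (board : String) (board_half : List Int) (out : Int × Int) : Decidable (Spec_piece_count_py board board_half out) := by unfold Spec_piece_count_py; infer_instance

-- ===== CLAIM (what is proved, stated in full; the proofs are below) =====
def Claim_equal_piece_count_py : Prop := ∀ (board : String) (board_half : List Int), Dom_piece_count_py board board_half → Pre_piece_count_py board board_half → Spec_piece_count_py board board_half (piece_count_py board board_half)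

-- ===== LEMMAS AND PROOFS =====
-- the common characterization: both ports compute these two counts over board.toList
def pvPW (cs : List Char) (i : Int) : Bool :=
  match PySem.List.pyGet? cs i with
  | some c => !decide (c = ' ') && decide (c < 'Z')
  | none => false
def pvPB (cs : List Char) (i : Int) : Bool :=
  match PySem.List.pyGet? cs i with
  | some c => !decide (c = ' ') && decide ('Z' ≤ c)
  | none => false

theorem pv_foldl_counts (cs : List Char) (l : List Int) (w b : Int) :
    l.foldl (fun (st : Int × Int) i =>
      match PySem.List.pyGet? cs i with
      | some c => if c = ' ' then st else if c < 'Z' then (st.1 + 1, st.2) else (st.1, st.2 + 1)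
      | none => st) (w, b)
    = (w + (l.countP (pvPW cs) : Int), b + (l.countP (pvPB cs) : Int)) := by
  induction l generalizing w b with
  | nil => simp
  | cons x xs ih =>
    simp only [List.foldl_cons, List.countP_cons]
    cases h : PySem.List.pyGet? cs x with
    | none => simp only [h]; rw [ih]; simp [pvPW, pvPB, h]
    | some c =>
      by_cases hs : c = ' '
      · subst hs; simp only [reduceIte]; rw [ih]; simp [pvPW, pvPB, h]
      · by_cases hz : c < 'Z'
        · have hle : ¬ ('Z' ≤ c) := not_le.mpr hz
          simp only [if_neg hs, if_pos hz]
          rw [ih]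
          simp only [pvPW, pvPB, h, hs, hz, hle, decide_true, decide_false, Bool.not_false,
            Bool.and_self, Bool.and_false, Prod.mk.injEq]
          constructor <;> push_cast <;> ring
        · have hle : 'Z' ≤ c := not_lt.mp hz
          simp only [if_neg hs, if_neg hz]
          rw [ih]
          simp only [pvPW, pvPB, h, hs, hz, hle, decide_true, decide_false, Bool.not_false,
            Bool.and_self, Bool.and_false, Prod.mk.injEq]
          constructor <;> push_cast <;> ring

theorem pv_alt_counts (board : String) (l : List Int) :
    piece_count_py_alt board l
      = ((l.countP (pvPW board.toList) : Int), (l.countP (pvPB board.toList) : Int)) := by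
  fun_induction piece_count_py_alt board l
  all_goals try simp_all [pvPW, pvPB, PySem.Str.pyGet?]
  next x y rest mid p1 p2 ih2 ih1 =>
    have hW : (x :: y :: rest).countP (pvPW board.toList)
        = (List.take mid (x :: y :: rest)).countP (pvPW board.toList)
          + (List.drop mid (x :: y :: rest)).countP (pvPW board.toList) := by
      conv_lhs => rw [← List.take_append_drop mid (x :: y :: rest)]
      rw [List.countP_append]
    have hB : (x :: y :: rest).countP (pvPB board.toList)
        = (List.take mid (x :: y :: rest)).countP (pvPB board.toList)
          + (List.drop mid (x :: y :: rest)).countP (pvPB board.toList) := by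
      conv_lhs => rw [← List.take_append_drop mid (x :: y :: rest)]
      rw [List.countP_append]
    simp only [p1, p2, ih1, ih2, hW, hB]
    constructor <;> push_cast <;> ring

-- ===== VERDICT (by name: the statement is the Claim_ definition above) =====
theorem piece_count_py_spec : Claim_equal_piece_count_py := by
  intro board board_half _ _
  unfold Spec_piece_count_py piece_count_py
  rw [pv_alt_counts]
  have hf : (fun (st : Int × Int) i =>
      match PySem.Str.pyGet? board i with
      | some c => if c ≠ ' ' then (if c < 'Z' then (st.1 + 1, st.2) else (st.1, st.2 + 1)) else st
      | none => st)
      = (fun (st : Int × Int) i =>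
      match PySem.List.pyGet? board.toList i with
      | some c => if c = ' ' then st else if c < 'Z' then (st.1 + 1, st.2) else (st.1, st.2 + 1)
      | none => st) := by
    funext st i
    simp only [PySem.Str.pyGet?, PySem.Chars.pyGet?_eq_listPyGet?]
    cases PySem.List.pyGet? board.toList i with
    | none => rfl
    | some c => by_cases hs : c = ' ' <;> simp [hs]
  rw [hf, pv_foldl_counts board.toList board_half 0 0]
  simp
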